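-- pv_equiv track=rewrite | github.com/Kentkn192837/AtCoder | EDPC/A.py | DP_search
-- ===== SOURCE A (Python) =====
-- def DP_search(h):
--     nodes = [0]
--     nodes.append(abs(h[1] - h[0]))
--     for i in range(2, len(h)):
--         a = abs(h[i] - h[i-1]) + nodes[i-1]
--         b = abs(h[i] - h[i-2]) + nodes[i-2]
--         nodes.append(a if a < b else b)
--     return nodes
-- ===== SOURCE B (Python) =====
-- def DP_search(h):
--     memo = {}
--
--     def cost(i):
--         if i in memo:
--             return memo[i]
--         if i == 0:
--             r = 0
--         elif i == 1:
--             r = abs(h[1] - h[0])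
--         else:
--             r = min(cost(i - 1) + abs(h[i] - h[i - 1]),
--                     cost(i - 2) + abs(h[i] - h[i - 2]))
--         memo[i] = r
--         return r
--
--     return [cost(i) for i in range(len(h))]
-- ===== Notes on version B (the rewrite author's own statement) =====
-- stated objective: alternative
-- what changed: Replaced the bottom-up table-building loop (append to a growing list, read back two slots) by a top-down recursive cost function with a dictionary memo, the output assembled by a comprehension over the indices.
-- outside the precondition, e.g. on DP_search([7]): A raises IndexError, B returns [0]
import Mathlib
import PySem

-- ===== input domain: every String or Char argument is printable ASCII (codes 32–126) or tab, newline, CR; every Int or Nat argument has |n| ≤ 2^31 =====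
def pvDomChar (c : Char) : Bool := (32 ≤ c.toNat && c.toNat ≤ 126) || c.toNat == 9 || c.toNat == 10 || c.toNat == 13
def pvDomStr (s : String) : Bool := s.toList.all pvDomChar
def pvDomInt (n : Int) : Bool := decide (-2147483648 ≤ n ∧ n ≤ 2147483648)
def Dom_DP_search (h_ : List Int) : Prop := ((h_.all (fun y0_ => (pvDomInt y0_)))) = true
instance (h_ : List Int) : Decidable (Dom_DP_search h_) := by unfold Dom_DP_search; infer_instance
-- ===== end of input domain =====

-- B replaces A's bottom-up table-building loop by a top-down recursive cost function with a
-- dictionary memo (alternative decomposition, same cost); on lists of length < 2 A raises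
-- IndexError (unconditional h[1]): outside Pre_.

-- ===== PORT A =====
-- A's loop body: reads h[i], h[i-1], h[i-2] and nodes[i-1], nodes[i-2]; all these indices are
-- in range under Pre_ (length ≥ 2), so getD's default is never used.
def pvStepA (h_ : List Int) (nodes : List Int) (i : Nat) : List Int :=
  let a := |h_.getD i 0 - h_.getD (i-1) 0| + nodes.getD (i-1) 0
  let b := |h_.getD i 0 - h_.getD (i-2) 0| + nodes.getD (i-2) 0
  nodes ++ [if a < b then a else b]

def DP_search (h_ : List Int) : List Int :=
  (List.range' 2 (h_.length - 2)).foldl (pvStepA h_) [0, |h_.getD 1 0 - h_.getD 0 0|]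

-- ===== PORT B =====
-- B's recursive `cost(i)` with the memo dict threaded explicitly (Python mutates it in place);
-- the indices it reads (h[1], h[0], h[i], h[i-1], h[i-2] for the i the comprehension passes)
-- are in range under Pre_, so getD's default is never used.
def pvCost (h_ : List Int) (i : Nat) (memo : PySem.Dict Int Int) : Int × PySem.Dict Int Int :=
  match memo.get? (i : Int) with
  | some v => (v, memo)
  | none =>
    match i with
    | 0 => (0, memo.insert 0 0)
    | 1 =>
      let r := |h_.getD 1 0 - h_.getD 0 0|
      (r, memo.insert 1 r)
    | (j+2) =>
      let p1 := pvCost h_ (j+1) memo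
      let p2 := pvCost h_ j p1.2
      let r := min (p1.1 + |h_.getD (j+2) 0 - h_.getD (j+1) 0|)
                   (p2.1 + |h_.getD (j+2) 0 - h_.getD j 0|)
      (r, p2.2.insert ((j+2 : Nat) : Int) r)

-- the comprehension `[cost(i) for i in range(len(h))]`, threading the memo left to right
def DP_search_alt (h_ : List Int) : List Int :=
  ((List.range h_.length).foldl
    (fun acc i =>
      let p := pvCost h_ i acc.2
      (acc.1 ++ [p.1], p.2))
    (([] : List Int), (PySem.Dict.empty : PySem.Dict Int Int))).1

-- ===== PRECONDITION & SPEC =====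
-- A accesses h[1] unconditionally: it raises IndexError on lists of length < 2.
def Pre_DP_search (h_ : List Int) : Prop := 2 ≤ h_.length
instance (h_ : List Int) : Decidable (Pre_DP_search h_) := by unfold Pre_DP_search; infer_instance
def pvWitness_DP_search : List Int := [3, 1, 4]

def Spec_DP_search (h_ : List Int) (out : List Int) : Prop := out = DP_search_alt h_
instance (h_ : List Int) (out : List Int) : Decidable (Spec_DP_search h_ out) := by unfold Spec_DP_search; infer_instance

-- ===== CLAIM (what is proved, stated in full; the proofs are below) =====
def Claim_equal_DP_search : Prop := ∀ (h_ : List Int), Dom_DP_search h_ → Pre_DP_search h_ → Spec_DP_search h_ (DP_search h_)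

-- ===== LEMMAS AND PROOFS =====

-- the ideal cost function both programs compute
def pvA (h_ : List Int) : Nat → Int
  | 0 => 0
  | 1 => |h_.getD 1 0 - h_.getD 0 0|
  | (i+2) =>
    let a := |h_.getD (i+2) 0 - h_.getD (i+1) 0| + pvA h_ (i+1)
    let b := |h_.getD (i+2) 0 - h_.getD i 0| + pvA h_ i
    if a < b then a else b

lemma pvGetD_map_range (f : Nat → Int) (k j : Nat) (hj : j < k) :
    ((List.range k).map f).getD j 0 = f j := by
  rw [List.getD_eq_getElem _ _ (by simpa using hj)]; simp

-- ---- A-side characterisation ----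
lemma pvNodesA (h_ : List Int) (m : Nat) :
    (List.range' 2 m).foldl (pvStepA h_) [0, |h_.getD 1 0 - h_.getD 0 0|]
      = (List.range (m+2)).map (pvA h_) := by
  induction m with
  | zero => simp [List.range_succ, pvA]
  | succ m ih =>
    rw [List.range'_concat, List.foldl_append, ih, List.foldl_cons, List.foldl_nil]
    rw [show (2 + 1 * m : Nat) = m + 2 from by omega]
    unfold pvStepA
    rw [show (m + 2 - 1 : Nat) = m + 1 from rfl, show (m + 2 - 2 : Nat) = m from rfl,
      pvGetD_map_range _ _ _ (by omega), pvGetD_map_range _ _ _ (by omega)]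
    simp [pvA, List.range_succ]

lemma DP_search_eq_map (h_ : List Int) (h2 : 2 ≤ h_.length) :
    DP_search h_ = (List.range h_.length).map (pvA h_) := by
  unfold DP_search
  rw [pvNodesA, show h_.length - 2 + 2 = h_.length from by omega]

-- ---- B-side: the memo only ever holds correct values ----
def pvInv (h_ : List Int) (m : PySem.Dict Int Int) : Prop :=
  ∀ (j : Nat) (v : Int), m.get? (j : Int) = some v → v = pvA h_ j

lemma pvInv_insert (h_ : List Int) (m : PySem.Dict Int Int) (i : Nat)
    (hm : pvInv h_ m) (hv : pvA h_ i = w) :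
    pvInv h_ (m.insert (i : Int) w) := by
  intro j v hg
  rw [PySem.Dict.get?_insert] at hg
  split_ifs at hg with hji
  · cases hg
    have : j = i := by exact_mod_cast hji
    subst this; exact hv.symm
  · exact hm j v hg

lemma pvCost_correct (h_ : List Int) (i : Nat) :
    ∀ m, pvInv h_ m → (pvCost h_ i m).1 = pvA h_ i ∧ pvInv h_ (pvCost h_ i m).2 := by
  induction i using Nat.strong_induction_on with
  | _ i ih =>
    intro m hm
    rw [pvCost.eq_def]
    cases hg : m.get? (i : Int) with
    | some v =>
      exact ⟨hm i v hg, hm⟩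
    | none =>
      match i with
      | 0 =>
        refine ⟨rfl, ?_⟩
        exact pvInv_insert h_ m 0 hm rfl
      | 1 =>
        refine ⟨rfl, ?_⟩
        exact pvInv_insert h_ m 1 hm rfl
      | (j+2) =>
        obtain ⟨h1, hm1⟩ := ih (j+1) (by omega) m hm
        obtain ⟨h2, hm2⟩ := ih j (by omega) _ hm1
        simp only
        rw [h1, h2]
        have hr : min (pvA h_ (j+1) + |h_.getD (j+2) 0 - h_.getD (j+1) 0|)
                      (pvA h_ j + |h_.getD (j+2) 0 - h_.getD j 0|) = pvA h_ (j+2) := by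
          rw [pvA]
          simp only [min_def]
          split_ifs <;> omega
        rw [hr]
        exact ⟨rfl, pvInv_insert h_ _ (j+2) hm2 rfl⟩

lemma pvFoldB (h_ : List Int) (k : Nat) :
    ((List.range k).foldl
      (fun acc i => let p := pvCost h_ i acc.2; (acc.1 ++ [p.1], p.2))
      (([] : List Int), (PySem.Dict.empty : PySem.Dict Int Int))).1
      = (List.range k).map (pvA h_)
    ∧ pvInv h_ ((List.range k).foldl
      (fun acc i => let p := pvCost h_ i acc.2; (acc.1 ++ [p.1], p.2))
      (([] : List Int), (PySem.Dict.empty : PySem.Dict Int Int))).2 := by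
  induction k with
  | zero =>
    refine ⟨rfl, ?_⟩
    intro j v hg
    simp [PySem.Dict.get?_empty] at hg
  | succ k ih =>
    obtain ⟨hacc, hinv⟩ := ih
    rw [List.range_succ, List.foldl_append, List.foldl_cons, List.foldl_nil]
    obtain ⟨hc, hci⟩ := pvCost_correct h_ k _ hinv
    constructor
    · simp only
      rw [hacc, hc]
      simp
    · exact hci

lemma DP_search_alt_eq_map (h_ : List Int) :
    DP_search_alt h_ = (List.range h_.length).map (pvA h_) := by
  unfold DP_search_alt
  exact (pvFoldB h_ h_.length).1

-- ===== VERDICT (by name: the statement is the Claim_ definition above) =====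
theorem DP_search_spec : Claim_equal_DP_search := by
  intro h_ _ hpre
  unfold Spec_DP_search
  rw [DP_search_eq_map h_ hpre, DP_search_alt_eq_map h_]
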